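-- pv_equiv track=rewrite | github.com/Valentino1994/dayAlgorithm | onedayAlgorithm/2022/Test/1015/t1.py | solution
-- ===== SOURCE A (Python) =====
-- def solution(source):
--
--     answer = ''
--     copySource = source
--
--     while copySource:
--         dest = []
--         for s in copySource:
--             if s not in dest:
--                 dest.append(s)
--                 copySource = copySource.replace(s, "", 1)
--
--         answer += "".join(sorted(dest))
--
--     return answer
-- ===== SOURCE B (Python) =====
-- def solution(source):
--     counts = {}
--     for ch in source:
--         counts[ch] = counts.get(ch, 0) + 1
--     chars = sorted(counts)
--     maxc = max(counts.values()) if counts else 0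
--     parts = []
--     for level in range(1, maxc + 1):
--         for c in chars:
--             if counts[c] >= level:
--                 parts.append(c)
--     return ''.join(parts)
-- ===== Notes on version B (the rewrite author's own statement) =====
-- stated objective: faster
-- what changed: A repeatedly rescans and rebuilds the shrinking string (one dedup-and-erase pass per frequency level); B counts each character once with a dict, then for each level 1..maxcount emits the sorted characters whose count reaches that level.
import Mathlib
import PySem

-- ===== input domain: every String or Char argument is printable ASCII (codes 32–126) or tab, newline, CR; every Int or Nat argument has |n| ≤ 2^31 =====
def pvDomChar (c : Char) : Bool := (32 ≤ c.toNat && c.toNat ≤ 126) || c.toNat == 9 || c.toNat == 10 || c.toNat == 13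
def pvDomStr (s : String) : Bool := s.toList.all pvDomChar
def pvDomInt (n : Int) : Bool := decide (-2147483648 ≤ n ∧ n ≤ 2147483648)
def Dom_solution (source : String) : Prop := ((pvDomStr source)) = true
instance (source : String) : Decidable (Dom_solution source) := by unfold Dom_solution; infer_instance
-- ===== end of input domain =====

-- B replaces A's repeated peel-and-rescan of the shrinking string by one character count
-- followed by emitting, for each frequency level, the sorted characters still at that level
-- (objective: faster — the rescans of the residual string disappear).

-- ===== PORT A =====
-- One step of A's inner 'for s in copySource' loop on (dest, copySource) as lists of chars:
-- 's not in dest' is List.contains; 'copySource.replace(s, "", 1)' removes the FIRST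
-- occurrence of the single character s, which is exactly List.erase (hand-ported, exact).
def solutionRoundF (st : List Char × List Char) (s : Char) : List Char × List Char :=
  if st.1.contains s then st else (st.1 ++ [s], st.2.erase s)

-- termination lemmas for the while loop (cited by the port's decreasing_by)
theorem solutionRoundF_snd_length_le (l : List Char) (d cp : List Char) :
    (l.foldl solutionRoundF (d, cp)).2.length ≤ cp.length := by
  induction l generalizing d cp with
  | nil => simp
  | cons s t ih =>
    simp only [List.foldl_cons, solutionRoundF]
    split
    · exact ih d cp
    · exact le_trans (ih _ _) List.length_erase_le

theorem solutionRound_length_lt (c : Char) (t : List Char) :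
    (((c :: t).foldl solutionRoundF ([], c :: t)).2).length < (c :: t).length := by
  have h0 : solutionRoundF ([], c :: t) c = ([c], t) := by
    simp [solutionRoundF]
  simp only [List.foldl_cons, h0]
  calc (t.foldl solutionRoundF ([c], t)).2.length ≤ t.length :=
        solutionRoundF_snd_length_le t [c] t
    _ < (c :: t).length := by simp

-- A's while loop: each pass collects first occurrences into dest (erasing them from the
-- copy), appends the sorted dest to the answer, and continues on the residual copy.
def solutionGo (cs : List Char) : List Char :=
  match cs with
  | [] => []
  | c :: t =>
    let st := (c :: t).foldl solutionRoundF ([], c :: t)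
    PySem.List.sorted st.1 (fun x => x) ++ solutionGo st.2
termination_by cs.length
decreasing_by simpa using solutionRound_length_lt c t

def solution (source : String) : String :=
  String.ofList (solutionGo source.toList)

-- ===== PORT B =====
-- counts[c] is written counts.getD c 0: every c looked up is a key of counts, so Python's
-- counts[c] never raises and equals the default-0 lookup.
def solution_alt (source : String) : String :=
  let counts := source.toList.foldl
    (fun d ch => d.insert ch (d.getD ch 0 + 1)) (PySem.Dict.empty : PySem.Dict Char Int)
  let chars := PySem.List.sorted counts.keys (fun x => x)
  let maxc : Int :=
    match PySem.List.max? counts.values (fun v => v) with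
    | some m => m
    | none => 0
  let parts := (PySem.List.pyRange 1 (maxc + 1)).foldl
    (fun acc lv => chars.foldl
      (fun acc c => if counts.getD c 0 ≥ lv then acc ++ [c] else acc) acc) []
  String.ofList parts

-- ===== PRECONDITION & SPEC =====
def Spec_solution (source : String) (out : String) : Prop := out = solution_alt source
instance (source : String) (out : String) : Decidable (Spec_solution source out) := by unfold Spec_solution; infer_instance

-- ===== CLAIM (what is proved, stated in full; the proofs are below) =====
def Claim_equal_solution : Prop := ∀ (source : String), Dom_solution source → Spec_solution source (solution source)

-- ===== LEMMAS AND PROOFS =====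

-- sorted distinct characters of cs
def sortedDistinct (cs : List Char) : List Char :=
  PySem.List.sorted (PySem.Set.ofList cs) (fun x => x)

-- levels 1..m: for each level, the chars of `chars` whose count reaches it
def levelsOf (cnt : Char → Nat) (chars : List Char) (m : Nat) : List Char :=
  (List.range m).flatMap (fun i => chars.filter (fun c => decide (i + 1 ≤ cnt c)))

-- the largest multiplicity in cs
def maxCnt (cs : List Char) : Nat :=
  cs.foldl (fun a c => max a (cs.count c)) 0

theorem foldl_roundF_mem_fst (l : List Char) (d cp : List Char) (x : Char) :
    x ∈ (l.foldl solutionRoundF (d, cp)).1 ↔ x ∈ d ∨ x ∈ l := by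
  induction l generalizing d cp with
  | nil => simp
  | cons s t ih =>
    simp only [List.foldl_cons, solutionRoundF]
    split
    · rename_i h
      rw [ih]
      simp only [List.contains_iff_mem] at h  -- hmm name?
      constructor
      · rintro (hd | ht)
        · exact Or.inl hd
        · exact Or.inr (List.mem_cons_of_mem s ht)
      · rintro (hd | hst)
        · exact Or.inl hd
        · rcases List.mem_cons.mp hst with rfl | ht
          · exact Or.inl h
          · exact Or.inr ht
    · rw [ih]
      simp [List.mem_append, List.mem_cons]
      tauto

theorem foldl_roundF_nodup_fst (l : List Char) (d cp : List Char) (hd : d.Nodup) :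
    (l.foldl solutionRoundF (d, cp)).1.Nodup := by
  induction l generalizing d cp with
  | nil => exact hd
  | cons s t ih =>
    simp only [List.foldl_cons, solutionRoundF]
    split
    · exact ih d cp hd
    · rename_i h
      refine ih _ _ ?_
      simp only [List.contains_iff_mem] at h
      simp only [List.nodup_append]
      refine ⟨hd, List.nodup_singleton s, ?_⟩
      intro a ha b hb
      rcases List.mem_singleton.mp hb with rfl
      intro he
      exact h (he ▸ ha)

theorem foldl_roundF_count_snd (l : List Char) (d cp : List Char)
    (h : ∀ x ∈ l, x ∉ d → x ∈ cp) (x : Char) :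
    (l.foldl solutionRoundF (d, cp)).2.count x
      = cp.count x - (if x ∈ l ∧ x ∉ d then 1 else 0) := by
  induction l generalizing d cp with
  | nil => simp
  | cons s t ih =>
    simp only [List.foldl_cons, solutionRoundF]
    split
    · rename_i hs
      simp only [List.contains_iff_mem] at hs
      rw [ih d cp (fun y hy => h y (List.mem_cons_of_mem s hy))]
      congr 1
      by_cases hx : x = s
      · subst hx; simp [hs]
      · simp [List.mem_cons, hx]
    · rename_i hs
      simp only [List.contains_iff_mem] at hs
      rw [ih (d ++ [s]) (cp.erase s) ?hyp]
      · rw [List.count_erase]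
        by_cases hx : x = s
        · subst hx
          simp [hs]
        · have hsx : ¬ (s = x) := fun e => hx e.symm
          rw [if_neg (by simp [hsx] : ¬ ((s == x) = true)), Nat.sub_zero]
          congr 1
          apply if_congr _ rfl rfl
          simp only [List.mem_append, List.mem_cons, not_or]
          constructor
          · rintro ⟨ht, hd', _⟩; exact ⟨Or.inr ht, hd'⟩
          · rintro ⟨hst, hd'⟩
            rcases hst with rfl | ht
            · exact absurd rfl hx
            · exact ⟨ht, hd', hx, List.not_mem_nil⟩
      case hyp =>
        intro y hy hyd
        simp only [List.mem_append, List.mem_cons, not_or] at hyd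
        have : y ∈ cp := h y (List.mem_cons_of_mem s hy) hyd.1
        have hys : y ≠ s := by simpa using hyd.2
        exact (List.mem_erase_of_ne hys).mpr this

theorem maxCnt_bound (cs : List Char) (x : Char) (hx : x ∈ cs) :
    cs.count x ≤ maxCnt cs :=
  (PySem.List.le_foldl_max_nat cs (fun c => cs.count c) 0).2 x hx

theorem levelsOf_stable (cnt : Char → Nat) (chars : List Char) (m k : Nat)
    (hb : ∀ x ∈ chars, cnt x ≤ m) :
    levelsOf cnt chars (m + k) = levelsOf cnt chars m := by
  induction k with
  | zero => rfl
  | succ k ih =>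
    rw [← ih]
    show levelsOf cnt chars ((m + k) + 1) = _
    unfold levelsOf
    rw [List.range_succ, List.flatMap_append]
    have : chars.filter (fun c => decide (m + k + 1 ≤ cnt c)) = [] := by
      apply List.filter_eq_nil_iff.mpr
      intro c hc
      have := hb c hc
      simp only [decide_eq_true_eq]
      omega
    simp only [List.flatMap_cons, List.flatMap_nil, List.append_nil, this]

theorem levelsOf_eq_of_bounds (cnt : Char → Nat) (chars : List Char) (m1 m2 : Nat)
    (h1 : ∀ x ∈ chars, cnt x ≤ m1) (h2 : ∀ x ∈ chars, cnt x ≤ m2) :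
    levelsOf cnt chars m1 = levelsOf cnt chars m2 := by
  rcases Nat.le_total m1 m2 with h | h
  · rw [(by omega : m2 = m1 + (m2 - m1)), levelsOf_stable cnt chars m1 _ h1]
  · rw [(by omega : m1 = m2 + (m1 - m2)), levelsOf_stable cnt chars m2 _ h2]

theorem pairwise_lt_filter (cs : List Char) (p : Char → Bool) :
    ((sortedDistinct cs).filter p).Pairwise (· < ·) :=
  List.Pairwise.sublist List.filter_sublist (PySem.List.sorted_ofList_pairwise_lt cs)

theorem eq_of_pairwise_lt_mem (l1 l2 : List Char)
    (h1 : l1.Pairwise (· < ·)) (h2 : l2.Pairwise (· < ·))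
    (hm : ∀ x, x ∈ l1 ↔ x ∈ l2) : l1 = l2 := by
  have n1 : l1.Nodup := h1.imp (fun h => ne_of_lt h)
  have n2 : l2.Nodup := h2.imp (fun h => ne_of_lt h)
  have hp : l1.Perm l2 := (List.perm_ext_iff_of_nodup n1 n2).mpr hm
  exact hp.eq_of_pairwise (fun a b _ _ hab hba => le_antisymm hab hba)
    (h1.imp le_of_lt) (h2.imp le_of_lt)

theorem mem_sortedDistinct (cs : List Char) (x : Char) :
    x ∈ sortedDistinct cs ↔ x ∈ cs := by
  unfold sortedDistinct
  rw [PySem.List.mem_sorted, PySem.Set.mem_ofList]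

theorem filter_level_eq (cs cs' : List Char)
    (h : ∀ x, cs'.count x = cs.count x - (if x ∈ cs then 1 else 0)) (i : Nat) :
    (sortedDistinct cs).filter (fun c => decide (i + 1 + 1 ≤ cs.count c))
      = (sortedDistinct cs').filter (fun c => decide (i + 1 ≤ cs'.count c)) := by
  apply eq_of_pairwise_lt_mem _ _ (pairwise_lt_filter _ _) (pairwise_lt_filter _ _)
  intro x
  simp only [List.mem_filter, mem_sortedDistinct, decide_eq_true_eq]
  have hc := h x
  constructor
  · rintro ⟨hx, hcnt⟩
    rw [if_pos hx] at hc
    have : 1 ≤ cs'.count x := by omega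
    exact ⟨List.count_pos_iff.mp this, by omega⟩
  · rintro ⟨hx, hcnt⟩
    have hx1 : 1 ≤ cs'.count x := List.count_pos_iff.mpr hx
    by_cases hxc : x ∈ cs
    · rw [if_pos hxc] at hc
      exact ⟨hxc, by omega⟩
    · rw [if_neg hxc] at hc
      have : cs.count x = 0 := List.count_eq_zero.mpr hxc
      omega

theorem levelsOf_succ (cnt : Char → Nat) (chars : List Char) (m : Nat) :
    levelsOf cnt chars (m + 1)
      = chars.filter (fun c => decide (0 < cnt c))
        ++ (List.range m).flatMap (fun i => chars.filter (fun c => decide (i + 1 + 1 ≤ cnt c))) := by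
  unfold levelsOf
  rw [List.range_succ_eq_map]
  simp [List.flatMap_cons, List.flatMap_map]

theorem go_levels (cs : List Char) :
    solutionGo cs = levelsOf (fun c => cs.count c) (sortedDistinct cs) (maxCnt cs) := by
  generalize hn : cs.length = n
  induction n using Nat.strong_induction_on generalizing cs with
  | _ n ih =>
    match cs, hn with
    | [], _ => simp [solutionGo, sortedDistinct, levelsOf, maxCnt]
    | c :: t, hn =>
      rw [solutionGo]
      set st := (c :: t).foldl solutionRoundF ([], c :: t) with hst
      have hmem : ∀ x, x ∈ st.1 ↔ x ∈ c :: t := fun x => by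
        simpa using foldl_roundF_mem_fst (c :: t) [] (c :: t) x
      have hnd : st.1.Nodup := foldl_roundF_nodup_fst (c :: t) [] (c :: t) List.nodup_nil
      have hcnt : ∀ x, st.2.count x = (c :: t).count x - (if x ∈ c :: t then 1 else 0) :=
        fun x => by simpa using foldl_roundF_count_snd (c :: t) [] (c :: t) (fun y hy _ => hy) x
      have hlen : st.2.length < (c :: t).length := solutionRound_length_lt c t
      have hsorted : PySem.List.sorted st.1 (fun x => x) = sortedDistinct (c :: t) := by
        apply PySem.List.sorted_eq_sorted_of_perm _ _ _ (fun a b h => h)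
        exact (List.perm_ext_iff_of_nodup hnd (PySem.Set.nodup_ofList _)).mpr
          (fun a => by rw [hmem, PySem.Set.mem_ofList])
      have hIH : solutionGo st.2
          = levelsOf (fun x => st.2.count x) (sortedDistinct st.2) (maxCnt st.2) :=
        ih st.2.length (hn ▸ hlen) st.2 rfl
      obtain ⟨m, hm⟩ : ∃ m, maxCnt (c :: t) = m + 1 := by
        refine ⟨maxCnt (c :: t) - 1, ?_⟩
        have h1 : 1 ≤ (c :: t).count c := List.count_pos_iff.mpr List.mem_cons_self
        have := maxCnt_bound (c :: t) c List.mem_cons_self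
        omega
      have hB1 : ∀ x ∈ sortedDistinct st.2, st.2.count x ≤ maxCnt st.2 := fun x hx =>
        maxCnt_bound _ x ((mem_sortedDistinct _ _).mp hx)
      have hB2 : ∀ x ∈ sortedDistinct st.2, st.2.count x ≤ m := by
        intro x hx
        rw [mem_sortedDistinct] at hx
        have h1 : 1 ≤ st.2.count x := List.count_pos_iff.mpr hx
        have h2 := hcnt x
        by_cases hxc : x ∈ c :: t
        · have h3 := maxCnt_bound (c :: t) x hxc
          rw [if_pos hxc] at h2
          omega
        · have : (c :: t).count x = 0 := List.count_eq_zero.mpr hxc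
          rw [if_neg hxc] at h2
          omega
      rw [hIH, levelsOf_eq_of_bounds _ _ _ m hB1 hB2, hsorted, hm, levelsOf_succ]
      congr 1
      · symm
        apply List.filter_eq_self.mpr
        intro x hx
        rw [mem_sortedDistinct] at hx
        simpa using List.count_pos_iff.mpr hx
      · unfold levelsOf
        exact congrArg (fun f => List.flatMap f (List.range m))
          (funext fun i => (filter_level_eq (c :: t) st.2 hcnt i).symm)

theorem pyRange_map (M : Nat) (a : Int) :
    PySem.List.pyRange a (a + M) = (List.range M).map (fun i : Nat => a + (i : Int)) := by
  induction M generalizing a with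
  | zero =>
    apply List.eq_nil_iff_forall_not_mem.mpr
    intro x hx
    have := PySem.List.mem_pyRange_one.mp hx
    omega
  | succ k ihs =>
    rw [PySem.List.pyRange_one_cons (by omega : a < a + ((k : Nat) + 1 : Nat))]
    have he : a + ((k : Nat) + 1 : Nat) = (a + 1) + (k : Nat) := by push_cast; ring
    rw [he, ihs (a + 1), List.range_succ_eq_map]
    simp only [List.map_cons, List.map_map]
    congr 1
    · simp
    · apply List.map_congr_left
      intro i _
      simp only [Function.comp_apply]
      push_cast
      ring

theorem max_values_counter (cs : List Char) (c : Char) (hc : c ∈ cs) :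
    PySem.List.max? (PySem.Dict.counter cs).values (fun v => v) = some ((maxCnt cs : Int)) := by
  have hv : (PySem.Dict.counter cs).values
      = (PySem.Set.ofList cs : List Char).map (fun k => (cs.count k : Int)) := by
    show ((PySem.Dict.counter cs).items.map (·.2)) = _
    rw [PySem.Dict.items_counter]
    simp [List.map_map, Function.comp]
  have hmemv : ((cs.count c : Int)) ∈ (PySem.Dict.counter cs).values := by
    rw [hv]
    exact List.mem_map.mpr ⟨c, (PySem.Set.mem_ofList cs c).mpr hc, rfl⟩
  cases hmax : PySem.List.max? (PySem.Dict.counter cs).values (fun v => v) with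
  | none =>
    rw [PySem.List.max?_eq_none_iff] at hmax
    rw [hmax] at hmemv
    cases hmemv
  | some mval =>
    have hmem := PySem.List.max?_mem hmax
    rw [hv] at hmem
    obtain ⟨k, hk, hkv⟩ := List.mem_map.mp hmem
    rw [PySem.Set.mem_ofList] at hk
    congr 1
    apply le_antisymm
    · rw [← hkv]
      exact_mod_cast maxCnt_bound cs k hk
    · -- the maximal count is attained (or is 0 ≤ mval)
      have hrw : (cs.map (fun x => cs.count x)).foldl max 0 = maxCnt cs := by
        rw [List.foldl_map]; rfl
      rcases PySem.List.foldl_max_mem (cs.map (fun x => cs.count x)) 0 with h0 | hmem2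
      · rw [hrw] at h0
        omega
      · rw [hrw] at hmem2
        obtain ⟨k0, hk0, hk0v⟩ := List.mem_map.mp hmem2
        have hvmem : ((cs.count k0 : Int)) ∈ (PySem.Dict.counter cs).values := by
          rw [hv]
          exact List.mem_map.mpr ⟨k0, (PySem.Set.mem_ofList cs k0).mpr hk0, rfl⟩
        have := PySem.List.max?_isMax hmax _ hvmem
        simp only at this
        rw [hk0v] at this
        exact this

theorem inner_foldl (chars acc : List Char) (lv : Int) (cnt : Char → Nat) :
    chars.foldl (fun acc c => if (cnt c : Int) ≥ lv then acc ++ [c] else acc) acc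
      = acc ++ chars.filter (fun c => decide (lv ≤ (cnt c : Int))) := by
  have h := PySem.List.foldl_append_if (fun c => decide (lv ≤ (cnt c : Int))) (fun c => c)
    chars acc
  simp only [decide_eq_true_eq, List.map_id_fun', id] at h
  simpa [ge_iff_le] using h

theorem alt_levels (source : String) :
    solution_alt source
      = String.ofList (levelsOf (fun c => source.toList.count c)
          (sortedDistinct source.toList) (maxCnt source.toList)) := by
  unfold solution_alt
  rw [PySem.Dict.foldl_insert_getD_add_one_eq_counter]
  generalize source.toList = cs
  cases cs with
  | nil => rfl
  | cons c t =>
    simp only [PySem.Dict.keys_counter, max_values_counter (c :: t) c List.mem_cons_self,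
      PySem.Dict.getD_counter]
    rw [(show ((maxCnt (c :: t) : Int) + 1) = 1 + ((maxCnt (c :: t) : Nat) : Int) from by ring),
      pyRange_map]
    congr 1
    rw [List.foldl_map]
    simp only [inner_foldl]
    rw [PySem.List.foldl_append_eq_flatMap, List.nil_append]
    unfold levelsOf sortedDistinct
    refine congrArg (fun f => List.flatMap f (List.range (maxCnt (c :: t)))) (funext fun i => ?_)
    apply List.filter_congr
    intro a _
    show decide (1 + (i : Int) ≤ (List.count a (c :: t) : Int))
        = decide (i + 1 ≤ List.count a (c :: t))
    apply decide_eq_decide.mpr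
    omega

-- ===== VERDICT (by name: the statement is the Claim_ definition above) =====
theorem solution_spec : Claim_equal_solution := by
  intro source _
  unfold Spec_solution solution
  rw [go_levels, alt_levels]
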